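-- pv_equiv track=rewrite | github.com/dvpuchades/CoinErudite | util/test_bank.py | is_BUSD
-- ===== SOURCE A (Python) =====
-- def is_BUSD(l):
--     ret = False
--     i = -1
--     while ret == False:
--         i = i + 1
--         if l[i]['asset'] == 'BUSD':
--             ret = True
--     return l[i]
-- ===== SOURCE B (Python) =====
-- def is_BUSD(l):
--     return [x for x in l if x.get('asset') == 'BUSD'][0]
-- ===== Notes on version B (the rewrite author's own statement) =====
-- stated objective: simpler
-- what changed: Replaces the index-based while loop with manual flag/counter state by a single filter comprehension (collect all matching elements, return the first); B scans the whole list instead of early-exiting.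
import Mathlib
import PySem

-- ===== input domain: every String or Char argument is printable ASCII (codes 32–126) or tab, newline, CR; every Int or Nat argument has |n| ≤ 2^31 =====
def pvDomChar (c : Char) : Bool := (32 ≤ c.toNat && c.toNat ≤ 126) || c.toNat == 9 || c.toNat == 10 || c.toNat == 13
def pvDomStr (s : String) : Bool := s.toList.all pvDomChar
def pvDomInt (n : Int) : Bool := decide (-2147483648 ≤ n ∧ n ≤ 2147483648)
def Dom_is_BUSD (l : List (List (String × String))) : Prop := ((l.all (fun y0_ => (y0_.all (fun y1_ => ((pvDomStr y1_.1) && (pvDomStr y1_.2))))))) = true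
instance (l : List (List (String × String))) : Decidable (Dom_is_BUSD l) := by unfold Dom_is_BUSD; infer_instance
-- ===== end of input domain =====

-- B replaces A's while loop with index/flag state by a filter-then-first comprehension (B scans the
-- whole list; return-value equivalence on Pre_, where A returns without raising).

-- ===== PORT A =====
-- A's while loop: advance i until l[i]['asset'] == 'BUSD'; none = IndexError (list exhausted) or
-- KeyError (missing 'asset'); under Pre_ the loop finds an element, so getD [] is never taken.
def is_BUSD_loop : List (List (String × String)) → Option (List (String × String))
  | [] => none
  | d :: rest =>
    match d.lookup "asset" with
    | none => none
    | some a => if a = "BUSD" then some d else is_BUSD_loop rest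

def is_BUSD (l : List (List (String × String))) : List (String × String) :=
  (is_BUSD_loop l).getD []

-- ===== PORT B =====
-- [x for x in l if x.get('asset') == 'BUSD'][0]
def is_BUSD_alt (l : List (List (String × String))) : List (String × String) :=
  (PySem.List.pyGet? (l.filter (fun d => d.lookup "asset" == some "BUSD")) 0).getD []

-- ===== PRECONDITION & SPEC =====
-- Pre_ = exactly the inputs on which A returns: some element maps 'asset' to 'BUSD', and every
-- element before the first such one has an 'asset' key (else A raises KeyError/IndexError).
def Pre_is_BUSD (l : List (List (String × String))) : Prop :=
  ∃ i < l.length, (l.getD i []).lookup "asset" = some "BUSD" ∧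
    ∀ j < i, ((l.getD j []).lookup "asset").isSome = true
instance (l : List (List (String × String))) : Decidable (Pre_is_BUSD l) := by
  unfold Pre_is_BUSD; infer_instance

def pvWitness_is_BUSD : (List (List (String × String))) :=
  ([[("asset", "USDT")], [("asset", "BUSD"), ("free", "7")]])

def Spec_is_BUSD (l : List (List (String × String))) (out : List (String × String)) : Prop := out = is_BUSD_alt l
instance (l : List (List (String × String))) (out : List (String × String)) : Decidable (Spec_is_BUSD l out) := by unfold Spec_is_BUSD; infer_instance

-- ===== CLAIM (what is proved, stated in full; the proofs are below) =====
def Claim_equal_is_BUSD : Prop := ∀ (l : List (List (String × String))), Dom_is_BUSD l → Pre_is_BUSD l → Spec_is_BUSD l (is_BUSD l)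

-- ===== LEMMAS AND PROOFS =====

theorem loop_eq_filter_head (l : List (List (String × String))) (hp : Pre_is_BUSD l) :
    is_BUSD_loop l = (l.filter (fun d => d.lookup "asset" == some "BUSD")).head? := by
  induction l with
  | nil =>
    obtain ⟨i, hi, _⟩ := hp
    simp at hi
  | cons d rest ih =>
    obtain ⟨i, hi, hbusd, hkeys⟩ := hp
    by_cases hd : d.lookup "asset" = some "BUSD"
    · simp [is_BUSD_loop, hd, List.filter_cons_of_pos]
    · have hi0 : i ≠ 0 := by
        intro h; subst h; simp [List.getD] at hbusd; exact hd hbusd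
      have hsome : (d.lookup "asset").isSome = true := by
        have := hkeys 0 (Nat.pos_of_ne_zero hi0)
        simpa [List.getD] using this
      obtain ⟨a, ha⟩ := Option.isSome_iff_exists.mp hsome
      have hane : a ≠ "BUSD" := by intro h; subst h; exact hd ha
      have hprest : Pre_is_BUSD rest := by
        refine ⟨i - 1, by simp only [List.length_cons] at hi; omega, ?_, ?_⟩
        · have : rest.getD (i - 1) [] = (d :: rest).getD i [] := by
            cases i with
            | zero => exact absurd rfl hi0
            | succ n => simp [List.getD]
          rw [this]; exact hbusd
        · intro j hj
          have := hkeys (j + 1) (by omega)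
          simpa [List.getD] using this
      rw [show is_BUSD_loop (d :: rest) = is_BUSD_loop rest from by
        simp [is_BUSD_loop, ha, hane]]
      rw [List.filter_cons_of_neg (by simp [hd])]
      exact ih hprest

theorem pyGet?_zero_head (xs : List (List (String × String))) :
    PySem.List.pyGet? xs 0 = xs.head? := by
  rw [PySem.List.pyGet?_zero]
  cases xs <;> simp

-- ===== VERDICT (by name: the statement is the Claim_ definition above) =====
theorem is_BUSD_spec : Claim_equal_is_BUSD := by
  intro l _ hp
  unfold Spec_is_BUSD is_BUSD is_BUSD_alt
  rw [loop_eq_filter_head l hp, pyGet?_zero_head]
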